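-- pv_equiv track=rewrite | github.com/justinshenk/temporal-awareness | src/intertemporal/experiments/attn/attn_pair_viz.py | _group_canonical_labels_by_format_pos
-- ===== SOURCE A (Python) =====
-- def _group_canonical_labels_by_format_pos(
--     canonical_labels: list[str],
-- ) -> list[tuple[str, list[int]]]:
--     groups: dict[str, list[int]] = {}
--     order: list[str] = []
--     for ci, full in enumerate(canonical_labels):
--         grp = full.split(":", 1)[0]
--         if grp not in groups:
--             groups[grp] = []
--             order.append(grp)
--         groups[grp].append(ci)
--     return [(g, groups[g]) for g in order]
-- ===== SOURCE B (Python) =====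
-- def _group_canonical_labels_by_format_pos(
--     canonical_labels: list[str],
-- ) -> list[tuple[str, list[int]]]:
--     prefixes = list(dict.fromkeys(full.split(":", 1)[0] for full in canonical_labels))
--     return [
--         (p, [ci for ci, full in enumerate(canonical_labels) if full.split(":", 1)[0] == p])
--         for p in prefixes
--     ]
-- ===== Notes on version B (the rewrite author's own statement) =====
-- stated objective: alternative
-- what changed: Replaces A's single stateful pass (dict-of-lists threaded with a separate first-seen order list) by a two-phase extract-then-regroup shape: an ordered dedup of the colon-prefixes first, then for each distinct prefix a scan of enumerate(canonical_labels) collecting its indices; this trades one extra scan per distinct prefix for stateless comprehensions.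
import Mathlib
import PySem

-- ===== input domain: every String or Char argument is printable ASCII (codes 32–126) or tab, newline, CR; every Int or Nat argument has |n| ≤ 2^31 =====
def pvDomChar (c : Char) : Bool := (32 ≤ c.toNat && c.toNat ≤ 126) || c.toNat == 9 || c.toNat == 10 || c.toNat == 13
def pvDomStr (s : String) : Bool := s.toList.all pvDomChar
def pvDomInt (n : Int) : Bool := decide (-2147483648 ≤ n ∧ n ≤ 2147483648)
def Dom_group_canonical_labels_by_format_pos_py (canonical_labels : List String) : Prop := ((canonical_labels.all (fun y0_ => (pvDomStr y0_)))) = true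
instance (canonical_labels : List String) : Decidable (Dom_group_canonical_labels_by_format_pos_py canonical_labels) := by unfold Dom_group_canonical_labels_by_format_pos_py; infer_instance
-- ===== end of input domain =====

-- B is an ALTERNATIVE decomposition (same result, no speed claim): an ordered dedup of the
-- colon-prefixes first, then per-prefix index collection — instead of A's stateful single pass.

-- shared helper: full.split(":", 1)[0] (split(":",1) is never empty, so [0] is total)
def pyPrefix (full : String) : String :=
  ((PySem.Str.splitMax? full ":" 1).getD []).headD ""

-- ===== PORT A =====
-- loop body of A's for-loop (named so the proofs can speak about it)
def stepA (st : PySem.Dict String (List Int) × List String) (p : Int × String) :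
    PySem.Dict String (List Int) × List String :=
  let grp := pyPrefix p.2
  let st := if st.1.contains grp then st else (st.1.insert grp [], st.2 ++ [grp])
  (st.1.modify grp [] (fun l => l ++ [p.1]), st.2)

def group_canonical_labels_by_format_pos_py (canonical_labels : List String) : List (String × List Int) :=
  let st := (PySem.List.enumerate canonical_labels).foldl stepA (PySem.Dict.empty, [])
  st.2.map (fun g => (g, st.1.getD g []))

-- ===== PORT B =====
def group_canonical_labels_by_format_pos_py_alt (canonical_labels : List String) : List (String × List Int) :=
  (PySem.List.dedup (canonical_labels.map pyPrefix)).map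
    (fun p => (p, ((PySem.List.enumerate canonical_labels).filter
      (fun q => pyPrefix q.2 == p)).map (·.1)))

-- ===== PRECONDITION & SPEC =====
def Spec_group_canonical_labels_by_format_pos_py (canonical_labels : List String) (out : List (String × List Int)) : Prop := out = group_canonical_labels_by_format_pos_py_alt canonical_labels
instance (canonical_labels : List String) (out : List (String × List Int)) : Decidable (Spec_group_canonical_labels_by_format_pos_py canonical_labels out) := by unfold Spec_group_canonical_labels_by_format_pos_py; infer_instance

-- ===== CLAIM (what is proved, stated in full; the proofs are below) =====
def Claim_equal_group_canonical_labels_by_format_pos_py : Prop := ∀ (canonical_labels : List String), Dom_group_canonical_labels_by_format_pos_py canonical_labels → Spec_group_canonical_labels_by_format_pos_py canonical_labels (group_canonical_labels_by_format_pos_py canonical_labels)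

-- ===== LEMMAS AND PROOFS =====

-- ordered dedup of a snoc
lemma dedup_snoc (l : List String) (x : String) :
    PySem.List.dedup (l ++ [x]) =
      if x ∈ l then PySem.List.dedup l else PySem.List.dedup l ++ [x] := by
  simp only [PySem.List.dedup_eq_ofList, PySem.Set.ofList_eq_foldl, List.foldl_append,
    List.foldl_cons, List.foldl_nil]
  rw [← PySem.Set.ofList_eq_foldl]
  by_cases h : x ∈ l
  · simp [PySem.Set.add, PySem.Set.mem_ofList, h]
  · simp [PySem.Set.add, PySem.Set.mem_ofList, h]

-- invariant of A's loop over enumerate xs 0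
lemma loopA_inv (xs : List String) :
    ((PySem.List.enumerate xs).foldl stepA (PySem.Dict.empty, [])).2
        = PySem.List.dedup (xs.map pyPrefix) ∧
    (∀ g, ((PySem.List.enumerate xs).foldl stepA (PySem.Dict.empty, [])).1.contains g
        = decide (g ∈ xs.map pyPrefix)) ∧
    (∀ g, ((PySem.List.enumerate xs).foldl stepA (PySem.Dict.empty, [])).1.getD g []
        = ((PySem.List.enumerate xs).filter (fun q => pyPrefix q.2 == g)).map (·.1)) := by
  induction xs using List.reverseRecOn with
  | nil =>
    refine ⟨rfl, fun g => by simp [PySem.List.enumerate_nil, PySem.Dict.contains_empty],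
      fun g => by simp [PySem.List.enumerate_nil, PySem.Dict.getD_empty]⟩
  | append_singleton xs x ih =>
    obtain ⟨ih2, ihc, ihD⟩ := ih
    have hen : PySem.List.enumerate (xs ++ [x]) =
        PySem.List.enumerate xs ++ [((0 : Int) + xs.length, x)] := by
      rw [PySem.List.enumerate_append]
      simp [PySem.List.enumerate_cons, PySem.List.enumerate_nil]
    rw [hen]
    simp only [List.foldl_append, List.foldl_cons, List.foldl_nil]
    set st := (PySem.List.enumerate xs).foldl stepA (PySem.Dict.empty, []) with hst
    by_cases hmem : pyPrefix x ∈ xs.map pyPrefix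
    · have hc : st.1.contains (pyPrefix x) = true := by rw [ihc]; simp [hmem]
      refine ⟨?_, ?_, ?_⟩
      · simp only [stepA, hc, if_true, ih2, List.map_append, List.map_cons, List.map_nil,
          dedup_snoc, hmem, if_true]
      · intro g
        simp only [stepA, hc, if_true, PySem.Dict.contains_modify, ihc, List.map_append,
          List.map_cons, List.map_nil, List.mem_append, List.mem_singleton]
        by_cases hg : g = pyPrefix x <;> simp [hg, hmem]
      · intro g
        simp only [stepA, hc, if_true, PySem.Dict.getD_modify, List.filter_append,
          List.filter_cons, List.filter_nil, List.map_append]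
        by_cases hg : g = pyPrefix x
        · simp [hg, ihD]
        · have : (pyPrefix x == g) = false := by simp [beq_eq_false_iff_ne]; exact fun h => hg h.symm
          simp [hg, ihD, this]
    · have hc : st.1.contains (pyPrefix x) = false := by rw [ihc]; simp [hmem]
      have hfil : (PySem.List.enumerate xs).filter (fun q => pyPrefix q.2 == pyPrefix x) = [] := by
        rw [List.filter_eq_nil_iff]
        intro q hq
        have hq2 : q.2 ∈ xs := by
          have := List.mem_map_of_mem (f := (·.2)) hq
          rwa [PySem.List.map_snd_enumerate] at this
        simp only [beq_iff_eq]
        exact fun he => hmem (he ▸ List.mem_map_of_mem hq2)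
      refine ⟨?_, ?_, ?_⟩
      · rw [List.map_append, List.map_cons, List.map_nil, dedup_snoc, if_neg hmem, ← ih2]
        simp [stepA, hc]
      · intro g
        simp only [stepA, hc]
        simp [PySem.Dict.contains_modify, PySem.Dict.contains_insert, ihc,
          List.map_append]
        by_cases hg : g = pyPrefix x <;> simp [hg]
      · intro g
        simp only [stepA, hc]
        simp only [Bool.false_eq_true, if_false, PySem.Dict.getD_modify,
          PySem.Dict.getD_insert, List.filter_append, List.filter_cons, List.filter_nil,
          List.map_append]
        by_cases hg : g = pyPrefix x
        · have := ihD (pyPrefix x)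
          rw [hfil] at this
          simp [hg, hfil]
        · have hne : (pyPrefix x == g) = false := by
            simp only [beq_eq_false_iff_ne]; exact fun h => hg h.symm
          simp [hg, ihD g, hne]

-- ===== VERDICT (by name: the statement is the Claim_ definition above) =====
theorem group_canonical_labels_by_format_pos_py_spec : Claim_equal_group_canonical_labels_by_format_pos_py := by
  intro xs _
  unfold Spec_group_canonical_labels_by_format_pos_py
  unfold group_canonical_labels_by_format_pos_py group_canonical_labels_by_format_pos_py_alt
  obtain ⟨h2, _, h3⟩ := loopA_inv xs
  dsimp only
  rw [h2]
  exact List.map_congr_left fun g _ => by rw [h3 g]
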